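-- pv_equiv track=rewrite | github.com/jamiejamiebobamie/tictactoe_backend | app/utils/utils.py | convertInputToKeys
-- ===== SOURCE A (Python) =====
-- def convertInputToKeys(turn, board):
--     """There's definitely a more pythonic way of writing this."""
--     turn0 = False
--     board0 = []
--     for space in board:
--         if space == turn:
--             space = int(turn0)
--         elif space != None:
--             space = int(not turn0)
--         board0.append(space)
--
--     turn1 = True
--     board1 = []
--     for space in board:
--         if space == turn:
--             space = int(turn1)
--         elif space != None:
--             space = int(not turn1)
--         board1.append(space)
--
--     return [(turn0,tuple(board0)),(turn1,tuple(board1))]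
-- ===== SOURCE B (Python) =====
-- def convertInputToKeys(turn, board):
--     board0 = [0 if space == turn else (1 if space is not None else None) for space in board]
--     board1 = [None if v is None else 1 - v for v in board0]
--     return [(False, tuple(board0)), (True, tuple(board1))]
-- ===== Notes on version B (the rewrite author's own statement) =====
-- stated objective: simpler
-- what changed: One scan of the board produces board0; board1 is derived from board0 by complementing each non-None entry (1-v) instead of re-scanning the board with a second copy of the classification loop.
import Mathlib
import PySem

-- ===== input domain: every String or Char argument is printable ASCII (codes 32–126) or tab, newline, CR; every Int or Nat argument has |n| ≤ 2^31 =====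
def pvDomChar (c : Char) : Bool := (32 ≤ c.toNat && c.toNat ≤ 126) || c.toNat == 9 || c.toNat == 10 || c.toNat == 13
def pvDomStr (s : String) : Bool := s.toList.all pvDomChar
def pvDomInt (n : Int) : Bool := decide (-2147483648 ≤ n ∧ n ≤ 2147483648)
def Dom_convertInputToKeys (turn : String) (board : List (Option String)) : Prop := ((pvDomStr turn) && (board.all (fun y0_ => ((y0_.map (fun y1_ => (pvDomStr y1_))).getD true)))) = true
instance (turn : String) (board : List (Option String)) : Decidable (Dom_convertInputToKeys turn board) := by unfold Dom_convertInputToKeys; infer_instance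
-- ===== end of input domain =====

-- B derives board1 from board0 by complementing (1-v) instead of re-scanning the board with a second copy of the loop.


-- ===== PORT A =====
-- one 'for space in board' loop of A, parametrised by the bool turnX (False for board0, True for board1)
def pvALoop (turn : String) (turnX : Bool) (board : List (Option String)) : List (Option Int) :=
  board.foldl (fun acc space =>
    acc ++ [if space = some turn then some (if turnX then (1 : Int) else 0)
            else match space with
                 | none => none
                 | some _ => some (if turnX then (0 : Int) else 1)]) []

def convertInputToKeys (turn : String) (board : List (Option String)) : List (Bool × List (Option Int)) :=
  let board0 := pvALoop turn false board
  let board1 := pvALoop turn true board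
  [(false, board0), (true, board1)]

-- ===== PORT B =====
def convertInputToKeys_alt (turn : String) (board : List (Option String)) : List (Bool × List (Option Int)) :=
  let board0 := board.map (fun space =>
    if space = some turn then some (0 : Int)
    else match space with
         | none => none
         | some _ => some (1 : Int))
  let board1 := board0.map (fun v => v.map (fun x => 1 - x))
  [(false, board0), (true, board1)]

-- ===== PRECONDITION & SPEC =====
def Spec_convertInputToKeys (turn : String) (board : List (Option String)) (out : List (Bool × List (Option Int))) : Prop := out = convertInputToKeys_alt turn board
instance (turn : String) (board : List (Option String)) (out : List (Bool × List (Option Int))) : Decidable (Spec_convertInputToKeys turn board out) := by unfold Spec_convertInputToKeys; infer_instance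

-- ===== CLAIM (what is proved, stated in full; the proofs are below) =====
def Claim_equal_convertInputToKeys : Prop := ∀ (turn : String) (board : List (Option String)), Dom_convertInputToKeys turn board → Spec_convertInputToKeys turn board (convertInputToKeys turn board)

-- ===== LEMMAS AND PROOFS =====
theorem pvFoldl_append_map {α β : Type} (f : α → β) (l : List α) (acc : List β) :
    l.foldl (fun acc x => acc ++ [f x]) acc = acc ++ l.map f := by
  induction l generalizing acc with
  | nil => simp
  | cons x xs ih => simp [List.foldl, ih]

theorem pvALoop_false (turn : String) (board : List (Option String)) :
    pvALoop turn false board = board.map (fun space =>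
      if space = some turn then some (0 : Int)
      else match space with
           | none => none
           | some _ => some (1 : Int)) := by
  unfold pvALoop
  rw [pvFoldl_append_map]
  simp

theorem pvALoop_true (turn : String) (board : List (Option String)) :
    pvALoop turn true board = (board.map (fun space =>
      if space = some turn then some (0 : Int)
      else match space with
           | none => none
           | some _ => some (1 : Int))).map (fun v => v.map (fun x => 1 - x)) := by
  unfold pvALoop
  rw [pvFoldl_append_map]
  simp only [List.nil_append, List.map_map]
  apply List.map_congr_left
  intro space _
  by_cases h : space = some turn
  · simp [h]
  · cases space with
    | none => simp [h]
    | some s => simp [h]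

-- ===== VERDICT (by name: the statement is the Claim_ definition above) =====
theorem convertInputToKeys_spec : Claim_equal_convertInputToKeys := by
  intro turn board _
  unfold Spec_convertInputToKeys convertInputToKeys convertInputToKeys_alt
  simp only [pvALoop_false, pvALoop_true]
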